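-- pv_equiv track=rewrite | github.com/khashayarkhaj/Adaptive-Tamaraw | src/experiments/fixed_defenses/Tamaraw/tamaraw_per_trace.py | partition_traces
-- ===== SOURCE A (Python) =====
-- def partition_traces(start_trace, end_trace, num_partitions):
--     """
--     Divide traces between start_trace and end_trace into equal partitions.
--
--     Parameters:
--     -----------
--     start_trace : int
--         Starting index
--     end_trace : int
--         Ending index
--     num_partitions : int
--         Number of desired partitions
--
--     Returns:
--     --------
--     partition_indices : list of tuples
--         List of (start_idx, end_idx) for each partition
--     """
--     total_traces = end_trace - start_trace
--     base_size = total_traces // num_partitions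
--
--     partition_indices = []
--     current_idx = start_trace
--
--     for i in range(num_partitions):
--         # For all partitions except the last one
--         if i < num_partitions - 1:
--             next_idx = current_idx + base_size
--         # For the last partition, go up to end_trace
--         else:
--             next_idx = end_trace
--
--         partition_indices.append((current_idx, next_idx))
--         current_idx = next_idx
--
--     return partition_indices
-- ===== SOURCE B (Python) =====
-- def partition_traces(start_trace, end_trace, num_partitions):
--     # Divide-and-conquer: recursively split the block of partitions in half,
--     # passing the outer boundaries down; only leaves emit (start, end) tuples.
--     base_size = (end_trace - start_trace) // num_partitions
--
--     def go(lo, hi, lo_bound, hi_bound):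
--         if hi - lo == 1:
--             return [(lo_bound, hi_bound)]
--         mid = (lo + hi) // 2
--         mid_bound = start_trace + mid * base_size
--         return go(lo, mid, lo_bound, mid_bound) + go(mid, hi, mid_bound, hi_bound)
--
--     if num_partitions <= 0:
--         return []
--     return go(0, num_partitions, start_trace, end_trace)
-- ===== Notes on version B (the rewrite author's own statement) =====
-- stated objective: alternative
-- what changed: Replaces A's left-to-right accumulator loop (with an explicit last-iteration branch) by a divide-and-conquer recursion that splits the block of partitions in half, passes the outer boundaries down, and only emits (start,end) tuples at the leaves.
import Mathlib
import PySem

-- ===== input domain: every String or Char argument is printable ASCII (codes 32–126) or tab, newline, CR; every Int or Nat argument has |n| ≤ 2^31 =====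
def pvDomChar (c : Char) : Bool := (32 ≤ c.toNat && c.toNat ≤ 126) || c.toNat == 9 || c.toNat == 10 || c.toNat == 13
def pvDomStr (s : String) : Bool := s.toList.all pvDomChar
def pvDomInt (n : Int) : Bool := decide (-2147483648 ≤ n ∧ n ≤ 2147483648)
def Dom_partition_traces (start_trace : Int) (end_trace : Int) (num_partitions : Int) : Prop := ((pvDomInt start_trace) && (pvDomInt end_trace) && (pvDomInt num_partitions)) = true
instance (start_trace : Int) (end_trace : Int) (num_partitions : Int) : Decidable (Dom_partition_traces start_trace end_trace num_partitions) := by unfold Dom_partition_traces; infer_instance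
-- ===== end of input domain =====

-- B replaces A's accumulator loop (with its explicit last-partition branch) by a
-- divide-and-conquer recursion that halves the block of partitions and only emits
-- tuples at the leaves; objective: alternative decomposition, same cost class.

-- ===== PORT A =====
def partition_traces (start_trace : Int) (end_trace : Int) (num_partitions : Int) : List (Int × Int) :=
  let total_traces := end_trace - start_trace
  let base_size := PySem.Int.floordiv total_traces num_partitions
  let st := (PySem.List.pyRange 0 num_partitions 1).foldl
    (fun (st : List (Int × Int) × Int) (i : Int) =>
      let next_idx := if i < num_partitions - 1 then st.2 + base_size else end_trace
      (st.1 ++ [(st.2, next_idx)], next_idx))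
    ([], start_trace)
  st.1

-- ===== PORT B =====
-- Source B's inner 'go': Python tests 'hi - lo == 1' and is only ever called with lo < hi;
-- the (Nat-subtraction) guard '≤ 1' coincides with '== 1' on all reachable calls and
-- only serves to make the recursion total.
def pvGo (s b : Int) (lo hi : Nat) (lb hb : Int) : List (Int × Int) :=
  if hi - lo ≤ 1 then [(lb, hb)]
  else
    pvGo s b lo ((lo + hi) / 2) lb (s + (((lo + hi) / 2 : Nat) : Int) * b)
      ++ pvGo s b ((lo + hi) / 2) hi (s + (((lo + hi) / 2 : Nat) : Int) * b) hb
termination_by hi - lo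
decreasing_by all_goals omega

def partition_traces_alt (start_trace : Int) (end_trace : Int) (num_partitions : Int) : List (Int × Int) :=
  let base_size := PySem.Int.floordiv (end_trace - start_trace) num_partitions
  if num_partitions ≤ 0 then []
  else pvGo start_trace base_size 0 num_partitions.toNat start_trace end_trace

-- ===== PRECONDITION & SPEC =====
-- Pre_ excludes exactly num_partitions = 0, where Python A raises ZeroDivisionError.
def Pre_partition_traces (start_trace : Int) (end_trace : Int) (num_partitions : Int) : Prop := num_partitions ≠ 0
instance (start_trace : Int) (end_trace : Int) (num_partitions : Int) : Decidable (Pre_partition_traces start_trace end_trace num_partitions) := by unfold Pre_partition_traces; infer_instance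
def pvWitness_partition_traces : Int × Int × Int := (0, 10, 3)

def Spec_partition_traces (start_trace : Int) (end_trace : Int) (num_partitions : Int) (out : List (Int × Int)) : Prop := out = partition_traces_alt start_trace end_trace num_partitions
instance (start_trace : Int) (end_trace : Int) (num_partitions : Int) (out : List (Int × Int)) : Decidable (Spec_partition_traces start_trace end_trace num_partitions out) := by unfold Spec_partition_traces; infer_instance

-- ===== CLAIM (what is proved, stated in full; the proofs are below) =====
def Claim_equal_partition_traces : Prop := ∀ (start_trace : Int) (end_trace : Int) (num_partitions : Int), Dom_partition_traces start_trace end_trace num_partitions → Pre_partition_traces start_trace end_trace num_partitions → Spec_partition_traces start_trace end_trace num_partitions (partition_traces start_trace end_trace num_partitions)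

-- ===== LEMMAS AND PROOFS =====

-- the k-th partition boundary
def pvF (s b : Int) (k : Nat) : Int := s + (k : Int) * b

-- characterisation of pvGo on reachable inputs (lo < hi): its leaves are exactly the
-- consecutive boundary pairs, with lb at position lo and hb at position hi.
theorem pvGo_eq (s b : Int) (d lo hi : Nat) (lb hb : Int) (hd : hi - lo ≤ d) (hlt : lo < hi) :
    pvGo s b lo hi lb hb =
      ((List.range' lo (hi - lo - 1)).map
        (fun k => ((if k = lo then lb else pvF s b k), pvF s b (k+1))))
        ++ [((if hi - 1 = lo then lb else pvF s b (hi - 1)), hb)] := by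
  induction d generalizing lo hi lb hb with
  | zero => omega
  | succ d ih =>
    rw [pvGo]
    by_cases h1 : hi - lo ≤ 1
    · have : hi = lo + 1 := by omega
      subst this
      simp
    · rw [if_neg h1]
      have hm1 : lo < (lo + hi) / 2 := by omega
      have hm2 : (lo + hi) / 2 < hi := by omega
      rw [ih lo ((lo+hi)/2) lb (s + ((((lo+hi)/2) : Nat) : Int) * b) (by omega) hm1,
          ih ((lo+hi)/2) hi (s + ((((lo+hi)/2) : Nat) : Int) * b) hb (by omega) hm2]
      set m := (lo + hi) / 2 with hm
      have hsb : s + ((m : Nat) : Int) * b = pvF s b m := rfl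
      rw [hsb]
      -- the second half's 'if k = m' choices all equal pvF s b k
      have hmap2 : (List.range' m (hi - m - 1)).map
            (fun k => ((if k = m then pvF s b m else pvF s b k), pvF s b (k+1)))
          = (List.range' m (hi - m - 1)).map
            (fun k => ((if k = lo then lb else pvF s b k), pvF s b (k+1))) := by
        apply List.map_congr_left
        intro k hk
        have hk' : m ≤ k := (List.mem_range'_1.mp hk).1
        have hklo : k ≠ lo := by omega
        rw [if_neg hklo]
        split <;> simp_all
      have hlast2 : (if hi - 1 = m then pvF s b m else pvF s b (hi - 1)) = pvF s b (hi - 1) := by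
        split <;> simp_all
      rw [hmap2, hlast2]
      have hone : [((if m - 1 = lo then lb else pvF s b (m - 1)), pvF s b m)]
          = (List.range' (m - 1) 1).map
              (fun k => ((if k = lo then lb else pvF s b k), pvF s b (k+1))) := by
        have : m - 1 + 1 = m := by omega
        simp [List.range', this]
      rw [hone, ← List.map_append, ← List.append_assoc, ← List.map_append]
      have hrange : (List.range' lo (m - lo - 1) ++ List.range' (m - 1) 1) ++ List.range' m (hi - m - 1)
          = List.range' lo (hi - lo - 1) := by
        have e1 := @List.range'_append lo (m - lo - 1) 1 1
        rw [show lo + 1 * (m - lo - 1) = m - 1 by omega,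
            show m - lo - 1 + 1 = m - lo by omega] at e1
        rw [e1]
        have e2 := @List.range'_append lo (m - lo) (hi - m - 1) 1
        rw [show lo + 1 * (m - lo) = m by omega,
            show m - lo + (hi - m - 1) = hi - lo - 1 by omega] at e2
        exact e2
      rw [hrange]
      simp [show ¬(hi - 1 = lo) by omega]

-- A's loop over the first j indices (all strictly below num_partitions - 1)
theorem pv_foldA_pre (n b s e : Int) (j : Nat) (hj : (j : Int) ≤ n - 1) :
    ((PySem.List.pyRange 0 (j : Int) 1).foldl
      (fun (st : List (Int × Int) × Int) (i : Int) =>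
        let next_idx := if i < n - 1 then st.2 + b else e
        (st.1 ++ [(st.2, next_idx)], next_idx))
      ([], s))
    = ((List.range j).map (fun i : Nat => (s + (i : Int) * b, s + ((i : Int) + 1) * b)), s + (j : Int) * b) := by
  induction j with
  | zero => simp [PySem.List.pyRange_one_eq_nil]
  | succ j ih =>
    have hj' : (j : Int) ≤ n - 1 := by push_cast at hj ⊢; omega
    have hlt : (j : Int) < n - 1 := by push_cast at hj; omega
    have hcast : ((j + 1 : Nat) : Int) = (j : Int) + 1 := by push_cast; ring
    have hsplit : PySem.List.pyRange 0 ((j : Int) + 1) 1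
        = PySem.List.pyRange 0 (j : Int) 1 ++ [(j : Int)] :=
      PySem.List.pyRange_one_succ_right (by positivity)
    rw [hcast, hsplit, List.foldl_append, ih hj']
    simp only [List.foldl_cons, List.foldl_nil, if_pos hlt, List.range_succ,
      List.map_append, List.map_cons, List.map_nil, Prod.mk.injEq]
    constructor
    · congr 3 <;> ring_nf
    · ring

theorem partition_traces_eq_alt (s e n : Int) (hn : n ≠ 0) :
    partition_traces s e n = partition_traces_alt s e n := by
  unfold partition_traces partition_traces_alt
  dsimp only
  rcases lt_or_gt_of_ne hn with hneg | hpos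
  · rw [PySem.List.pyRange_one_eq_nil (by omega), if_pos (by omega)]
    simp
  · rw [if_neg (by omega)]
    obtain ⟨m, rfl⟩ : ∃ m : Nat, n = (m : Int) + 1 := by
      refine ⟨(n - 1).toNat, ?_⟩; omega
    set b := PySem.Int.floordiv (e - s) ((m : Int) + 1) with hb
    have htN : ((m : Int) + 1).toNat = m + 1 := by omega
    rw [htN]
    -- A side
    have hsplit : PySem.List.pyRange 0 ((m : Int) + 1) 1
        = PySem.List.pyRange 0 (m : Int) 1 ++ [(m : Int)] :=
      PySem.List.pyRange_one_succ_right (by positivity)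
    rw [hsplit, List.foldl_append, pv_foldA_pre ((m:Int)+1) b s e m (by push_cast; omega)]
    simp only [List.foldl_cons, List.foldl_nil]
    rw [if_neg (by push_cast; omega)]
    -- B side
    rw [pvGo_eq s b (m+1) 0 (m+1) s e (by omega) (by omega)]
    have hf0 : pvF s b 0 = s := by simp [pvF]
    have hmapB : (List.range' 0 (m + 1 - 0 - 1)).map
          (fun k => ((if k = 0 then s else pvF s b k), pvF s b (k+1)))
        = (List.range m).map (fun i : Nat => (s + (i : Int) * b, s + ((i : Int) + 1) * b)) := by
      rw [show m + 1 - 0 - 1 = m from rfl, ← List.range_eq_range']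
      apply List.map_congr_left
      intro k _
      have h1 : (if k = 0 then s else pvF s b k) = pvF s b k := by
        split <;> simp_all [pvF]
      rw [h1]
      unfold pvF
      congr 1
    rw [hmapB]
    have hlast : (if m + 1 - 1 = 0 then s else pvF s b (m + 1 - 1)) = s + (m : Int) * b := by
      simp only [Nat.add_sub_cancel]
      split <;> simp_all [pvF]
    rw [hlast]

-- ===== VERDICT (by name: the statement is the Claim_ definition above) =====
theorem partition_traces_spec : Claim_equal_partition_traces := by
  intro s e n _ hpre
  unfold Spec_partition_traces
  exact partition_traces_eq_alt s e n hpre
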